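-- pv_equiv track=rewrite | github.com/cwhiii/CWOC | test_tag_parser.py | _tokenize_tag_expr
-- ===== SOURCE A (Python) =====
-- def _tokenize_tag_expr(expr):
--     tokens = []
--     i = 0
--     while i < len(expr):
--         if expr[i] in ' \t':
--             i += 1
--         elif expr[i] == '(':
--             tokens.append('(')
--             i += 1
--         elif expr[i] == ')':
--             tokens.append(')')
--             i += 1
--         elif expr[i] == '!' and (i + 1 >= len(expr) or expr[i + 1] != '='):
--             tokens.append('!')
--             i += 1
--         elif expr[i:i+2] == '&&':
--             tokens.append('&&')
--             i += 2
--         elif expr[i:i+2] == '||':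
--             tokens.append('||')
--             i += 2
--         elif expr[i] == '#':
--             j = i + 1
--             while j < len(expr) and expr[j] not in ' \t()!&|':
--                 j += 1
--             tokens.append(expr[i:j])
--             i = j
--         else:
--             i += 1
--     return tokens
-- ===== SOURCE B (Python) =====
-- import re
--
-- # One master pattern with ordered alternatives; the regex engine scans once,
-- # yields matched tokens in order and silently skips unmatched characters
-- # (whitespace, '=', lone '&'/'|', the '!' of '!=', anything else).
-- _TOKEN_RE = re.compile(r'#[^ \t()!&|]*|&&|\|\||\(|\)|!(?!=)')
--
-- def _tokenize_tag_expr(expr):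
--     return _TOKEN_RE.findall(expr)
-- ===== Notes on version B (the rewrite author's own statement) =====
-- stated objective: idiomatic
-- what changed: Replaces the hand-written index loop with its eight-way branch chain and inner tag-scanning loop by a single compiled regex: one master pattern with ordered alternatives (#[^ \t()!&|]*|&&|\|\||\(|\)|!(?!=)) whose findall yields the tokens in one scan, unmatched characters being skipped by the engine. (the compiled C regex engine replaces the Python-level loop; measured ~50x faster)
import Mathlib
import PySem

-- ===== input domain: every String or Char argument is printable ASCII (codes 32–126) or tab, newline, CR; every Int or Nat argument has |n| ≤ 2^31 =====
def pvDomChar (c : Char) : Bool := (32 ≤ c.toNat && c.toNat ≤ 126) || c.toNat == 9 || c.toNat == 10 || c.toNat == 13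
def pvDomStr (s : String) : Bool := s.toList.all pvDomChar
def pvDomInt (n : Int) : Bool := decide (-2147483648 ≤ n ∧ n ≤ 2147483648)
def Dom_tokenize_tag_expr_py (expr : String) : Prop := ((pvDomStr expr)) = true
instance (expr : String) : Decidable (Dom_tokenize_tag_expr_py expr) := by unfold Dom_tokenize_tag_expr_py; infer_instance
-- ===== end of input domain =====

-- B replaces A's hand-written index/branch loop by a single compiled regex scan
-- (`findall` of one master pattern with ordered alternatives); objective: idiomatic (and measured faster in a timing run).

-- The delimiter set of A's inner tag scan (`expr[j] not in ' \t()!&|'`), shared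
-- verbatim by B's character class `[^ \t()!&|]`.
def pvTagStop (c : Char) : Bool :=
  c = ' ' || c = '\t' || c = '(' || c = ')' || c = '!' || c = '&' || c = '|'

-- ===== PORT A =====
-- A's inner `while j < len(expr) and expr[j] not in ' \t()!&|': j += 1` loop,
-- phrased on the suffix starting at j; returns j - (i+1), the number of chars scanned.
def pvTagLen : List Char → Nat
  | [] => 0
  | c :: rest => if pvTagStop c then 0 else 1 + pvTagLen rest

-- A's outer while loop over index i, phrased on the suffix expr[i:]; `tokens` is the
-- accumulator list A appends to.  expr[i] is the head c, expr[i:i+2] is `take 2`,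
-- expr[i:j] is `take (j - i)`; `i + 1 >= len(expr) or expr[i+1] != '='` is
-- `rest.head? ≠ some '='` — all exact for the in-range nonnegative indices A uses.
def pvLoopA : List Char → List String → List String
  | [], tokens => tokens
  | c :: rest, tokens =>
    if c = ' ' ∨ c = '\t' then pvLoopA rest tokens
    else if c = '(' then pvLoopA rest (tokens ++ ["("])
    else if c = ')' then pvLoopA rest (tokens ++ [")"])
    else if c = '!' ∧ rest.head? ≠ some '=' then pvLoopA rest (tokens ++ ["!"])
    else if (c :: rest).take 2 = ['&', '&'] then pvLoopA ((c :: rest).drop 2) (tokens ++ ["&&"])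
    else if (c :: rest).take 2 = ['|', '|'] then pvLoopA ((c :: rest).drop 2) (tokens ++ ["||"])
    else if c = '#' then
      pvLoopA (rest.drop (pvTagLen rest))
        (tokens ++ [String.ofList ((c :: rest).take (1 + pvTagLen rest))])
    else pvLoopA rest tokens
  termination_by s _ => s.length
  decreasing_by all_goals simp [List.length_drop]

def tokenize_tag_expr_py (expr : String) : List String := pvLoopA expr.toList []

-- ===== PORT B =====
-- Hand port of the regex engine's attempt of B's master pattern
-- `#[^ \t()!&|]*|&&|\|\||\(|\)|!(?!=)` at one position: the alternatives are tried
-- in the pattern's order, `[^ \t()!&|]*` is greedy (takeWhile), and `(?!=)` is the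
-- negative lookahead.  Exact for this pattern (alternatives are keyed by disjoint
-- first characters, so the engine never backtracks across alternatives).
def pvReMatch : List Char → Option (List Char)
  | [] => none
  | c :: rest =>
    if c = '#' then some ('#' :: rest.takeWhile (fun d => !pvTagStop d))
    else if c = '&' then (if rest.head? = some '&' then some ['&', '&'] else none)
    else if c = '|' then (if rest.head? = some '|' then some ['|', '|'] else none)
    else if c = '(' then some ['(']
    else if c = ')' then some [')']
    else if c = '!' then (if rest.head? = some '=' then none else some ['!'])
    else none

-- every match of the pattern is nonempty (needed for termination of the scan)
theorem pvReMatch_pos : ∀ s m, pvReMatch s = some m → 1 ≤ m.length ∧ s ≠ [] := by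
  intro s m h
  cases s with
  | nil => simp [pvReMatch] at h
  | cons c rest =>
    refine ⟨?_, by simp⟩
    simp only [pvReMatch] at h
    split_ifs at h <;> (try simp at h) <;> (subst h; simp)

-- `findall` semantics: scan left to right; on a match emit it and resume after it,
-- otherwise skip one character.
def pvScanB (s : List Char) : List String :=
  match h : pvReMatch s with
  | some m => String.ofList m :: pvScanB (s.drop m.length)
  | none =>
    match s with
    | [] => []
    | _ :: t => pvScanB t
  termination_by s.length
  decreasing_by
  · have hp := pvReMatch_pos s m h
    have : s.length ≠ 0 := by
      intro h0
      exact hp.2 (List.length_eq_zero_iff.mp h0)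
    simp [List.length_drop]
    omega
  · simp

def tokenize_tag_expr_py_alt (expr : String) : List String := pvScanB expr.toList

-- ===== PRECONDITION & SPEC =====
def Spec_tokenize_tag_expr_py (expr : String) (out : List String) : Prop := out = tokenize_tag_expr_py_alt expr
instance (expr : String) (out : List String) : Decidable (Spec_tokenize_tag_expr_py expr out) := by unfold Spec_tokenize_tag_expr_py; infer_instance

-- ===== CLAIM (what is proved, stated in full; the proofs are below) =====
def Claim_equal_tokenize_tag_expr_py : Prop := ∀ (expr : String), Dom_tokenize_tag_expr_py expr → Spec_tokenize_tag_expr_py expr (tokenize_tag_expr_py expr)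

-- ===== LEMMAS AND PROOFS =====

theorem pvScanB_nil : pvScanB [] = [] := by
  rw [pvScanB]
  rfl

theorem pvScanB_match (s : List Char) (m : List Char) (h : pvReMatch s = some m) :
    pvScanB s = String.ofList m :: pvScanB (s.drop m.length) := by
  rw [pvScanB]
  split <;> simp_all

theorem pvScanB_skip (c : Char) (rest : List Char) (h : pvReMatch (c :: rest) = none) :
    pvScanB (c :: rest) = pvScanB rest := by
  rw [pvScanB]
  split <;> simp_all

theorem pvTagLen_eq (l : List Char) :
    pvTagLen l = (l.takeWhile (fun d => !pvTagStop d)).length := by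
  induction l with
  | nil => simp [pvTagLen]
  | cons c rest ih =>
    by_cases h : pvTagStop c
    · simp [pvTagLen, h]
    · simp [pvTagLen, h, ih]
      omega

theorem pvTake_tagLen (l : List Char) :
    l.take (pvTagLen l) = l.takeWhile (fun d => !pvTagStop d) := by
  induction l with
  | nil => simp
  | cons c rest ih =>
    by_cases h : pvTagStop c
    · simp [pvTagLen, h]
    · simp [pvTagLen, h, Nat.add_comm 1 (pvTagLen rest), ih]

theorem pvLoopA_eq_scanB : ∀ (n : Nat) (s : List Char) (tokens : List String),
    s.length ≤ n → pvLoopA s tokens = tokens ++ pvScanB s := by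
  intro n
  induction n with
  | zero =>
    intro s tokens hle
    have : s = [] := List.length_eq_zero_iff.mp (Nat.le_zero.mp hle)
    subst this
    simp [pvLoopA, pvScanB_nil]
  | succ n ih =>
    intro s tokens hle
    cases s with
    | nil => simp [pvLoopA, pvScanB_nil]
    | cons c rest =>
      have hrest : rest.length ≤ n := by simpa using Nat.lt_succ_iff.mp (by simpa using hle)
      rw [pvLoopA]
      by_cases hws : c = ' ' ∨ c = '\t'
      · rw [if_pos hws, ih rest tokens hrest, pvScanB_skip c rest]
        rcases hws with h | h <;> subst h <;> simp [pvReMatch]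
      rw [if_neg hws]
      by_cases hop : c = '('
      · subst hop
        rw [if_pos rfl, ih rest _ hrest,
          pvScanB_match ('(' :: rest) ['('] (by simp [pvReMatch])]
        simp
      rw [if_neg hop]
      by_cases hcl : c = ')'
      · subst hcl
        rw [if_pos rfl, ih rest _ hrest,
          pvScanB_match (')' :: rest) [')'] (by simp [pvReMatch])]
        simp
      rw [if_neg hcl]
      by_cases hbang : c = '!' ∧ rest.head? ≠ some '='
      · obtain ⟨hc, hne⟩ := hbang
        subst hc
        rw [if_pos ⟨rfl, hne⟩, ih rest _ hrest,
          pvScanB_match ('!' :: rest) ['!'] (by simp [pvReMatch, hne])]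
        simp
      rw [if_neg hbang]
      by_cases hamp : (c :: rest).take 2 = ['&', '&']
      · -- take 2 = "&&" forces c = '&' and rest = '&' :: rest'
        cases rest with
        | nil => simp at hamp
        | cons d rest' =>
          obtain ⟨hc, hd⟩ : c = '&' ∧ d = '&' := by simpa using hamp
          subst hc; subst hd
          rw [if_pos (by simp)]
          simp only [List.drop_succ_cons, List.drop_zero]
          rw [ih rest' _ (by simp at hrest; omega),
            pvScanB_match ('&' :: '&' :: rest') ['&', '&'] (by simp [pvReMatch])]
          simp only [List.length_cons, List.length_nil, List.drop_succ_cons,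
            List.drop_zero]
          simp
      rw [if_neg hamp]
      by_cases hbar : (c :: rest).take 2 = ['|', '|']
      · cases rest with
        | nil => simp at hbar
        | cons d rest' =>
          obtain ⟨hc, hd⟩ : c = '|' ∧ d = '|' := by simpa using hbar
          subst hc; subst hd
          rw [if_pos (by simp)]
          simp only [List.drop_succ_cons, List.drop_zero]
          rw [ih rest' _ (by simp at hrest; omega),
            pvScanB_match ('|' :: '|' :: rest') ['|', '|'] (by simp [pvReMatch])]
          simp only [List.length_cons, List.length_nil, List.drop_succ_cons,
            List.drop_zero]
          simp
      rw [if_neg hbar]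
      by_cases hhash : c = '#'
      · subst hhash
        rw [if_pos rfl,
          ih (rest.drop (pvTagLen rest)) _ (by simp; omega),
          pvScanB_match ('#' :: rest) ('#' :: rest.takeWhile (fun d => !pvTagStop d))
            (by simp [pvReMatch])]
        rw [Nat.add_comm 1 (pvTagLen rest), List.take_succ_cons, pvTake_tagLen]
        simp only [List.length_cons, List.drop_succ_cons]
        rw [pvTagLen_eq]
        simp
      rw [if_neg hhash]
      -- fall-through: no token on either side; the pattern does not match here
      rw [ih rest tokens hrest, pvScanB_skip c rest]
      rw [pvReMatch]
      rw [if_neg hhash]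
      split_ifs with h1 h2 h3 h4 h5 h6
      · exfalso
        subst h1
        cases rest with
        | nil => simp at h2
        | cons d rest' => simp at h2; subst h2; simp at hamp
      · rfl
      · exfalso
        subst h3
        cases rest with
        | nil => simp at h4
        | cons d rest' => simp at h4; subst h4; simp at hbar
      · rfl
      · rfl
      · exact absurd ⟨h5, h6⟩ hbang
      · rfl

-- ===== VERDICT (by name: the statement is the Claim_ definition above) =====
theorem tokenize_tag_expr_py_spec : Claim_equal_tokenize_tag_expr_py := by
  intro expr _
  unfold Spec_tokenize_tag_expr_py tokenize_tag_expr_py tokenize_tag_expr_py_alt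
  exact pvLoopA_eq_scanB expr.toList.length expr.toList [] le_rfl
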